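-- pv_equiv track=rewrite | github.com/NiruddeshJatra/DSA-Coding_Ninja_problems | Sliding Window/P97 - Sum of minimum and maximum elements of all subarrays of size “K”.py | sumOfMaxAndMin
-- ===== SOURCE A (Python) =====
-- from collections import deque
--
-- def sumOfMaxAndMin(nums, n, k):
--     # Time Complexity: O(n)
--     # Space Complexity: O(k)
--
--     # INTUITION:
--     # This function calculates the sum of the maximum and minimum elements
--     # in each sliding window of size 'k' in the given list 'nums'.
--     # The approach involves maintaining two dequeues, 'maxq' and 'minq',
--     # to keep track of the maximum and minimum elements in the current window,
--     # respectively.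
--
--     # ALGO:
--     # 1. Initialize variables: 'ans' to store the sum of maximum and minimum
--     #    elements in each window, 'maxq' and 'minq' as dequeues to store the
--     #    indices of maximum and minimum elements in the current window, and
--     #    'l' as the left pointer of the sliding window.
--     # 2. Iterate through each index 'r' in the range of 'n', the length of 'nums'.
--     #    2.1. While 'maxq' is not empty and the current element 'nums[r]' is greater
--     #         than the value at the index 'maxq[-1]' (rightmost element in 'maxq'),
--     #         pop elements from 'maxq' until 'nums[r]' is not greater than the value
--     #         at 'maxq[-1]'.
--     #    2.2. Append the index 'r' to 'maxq'.
--     #    2.3. Similar to step 2.1, update 'minq' with the current minimum elements.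
--     #    2.4. If the leftmost index 'l' is greater than the leftmost index in 'maxq'
--     #         or 'minq', pop the leftmost index from 'maxq' and 'minq' until 'l' is
--     #         not greater than the leftmost index in 'maxq' or 'minq'.
--     #    2.5. If the current index 'r' has reached a position where the window size
--     #         is 'k', add the sum of the maximum and minimum elements from the
--     #         respective queues to 'ans'.
--     #         - Increment 'l' to move the left pointer.
--     # 3. Return 'ans'.
--
--     ans = 0
--     maxq, minq = deque(), deque()
--     l = 0
--
--     for r in range(n):
--         while maxq and nums[r] > nums[maxq[-1]]:
--             maxq.pop()
--
--         maxq.append(r)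
--
--         while minq and nums[r] < nums[minq[-1]]:
--             minq.pop()
--
--         minq.append(r)
--
--         if l > maxq[0]:
--             maxq.popleft()
--
--         if l > minq[0]:
--             minq.popleft()
--
--         if r >= k - 1:
--             ans += nums[maxq[0]] + nums[minq[0]]
--             l += 1
--
--     return ans
-- ===== SOURCE B (Python) =====
-- def sumOfMaxAndMin(nums, n, k):
--     # Sum of max+min over all size-k windows, by rescanning each window slice.
--     total = 0
--     for r in range(k - 1, n):
--         window = nums[r - k + 1 : r + 1]
--         total += max(window) + min(window)
--     return total
-- ===== Notes on version B (the rewrite author's own statement) =====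
-- stated objective: simpler
-- what changed: Replaced A's two monotonic index deques and left-pointer bookkeeping with a direct rescan taking max and min of each window slice; Pre_ excludes k <= 0 with k - 1 < n, where A's left-pointer bookkeeping accidentally yields size-1 windows while the natural rescan raises on the empty slice.
-- outside the precondition, e.g. on sumOfMaxAndMin([1, 2, 3], 3, 0): A returns 12, B raises ValueError
import Mathlib
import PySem

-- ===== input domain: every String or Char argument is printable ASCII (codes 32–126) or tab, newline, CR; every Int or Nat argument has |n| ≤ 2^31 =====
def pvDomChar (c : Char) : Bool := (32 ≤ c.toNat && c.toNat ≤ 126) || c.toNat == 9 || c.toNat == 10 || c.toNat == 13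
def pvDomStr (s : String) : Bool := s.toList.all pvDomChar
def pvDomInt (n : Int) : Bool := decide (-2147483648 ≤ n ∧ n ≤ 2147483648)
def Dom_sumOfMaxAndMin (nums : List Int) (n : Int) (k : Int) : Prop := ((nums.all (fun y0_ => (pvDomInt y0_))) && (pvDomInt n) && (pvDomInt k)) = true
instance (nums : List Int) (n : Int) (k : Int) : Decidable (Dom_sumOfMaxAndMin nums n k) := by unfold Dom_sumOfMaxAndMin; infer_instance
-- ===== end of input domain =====

-- B replaces A's two monotonic deques by a direct max/min rescan of each size-k window (simpler; no speed claim).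

-- ===== PORT A =====
-- nums[i] for an index the loop keeps in range under Pre_ (0 ≤ i < n ≤ len nums)
def pvGetI (nums : List Int) (i : Int) : Int := (PySem.List.pyGet? nums i).getD 0

-- 'while q and p(q[-1]): q.pop()'  (deque as a list, front at the head)
def pvPopBack (p : Int → Bool) (q : List Int) : List Int := (q.reverse.dropWhile p).reverse

-- one iteration of A's 'for r in range(n)' body; state = (ans, maxq, minq, l)
def pvStepA (nums : List Int) (k : Int) (st : Int × List Int × List Int × Int) (r : Int) :
    Int × List Int × List Int × Int :=
  let ans := st.1
  let maxq := st.2.1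
  let minq := st.2.2.1
  let l := st.2.2.2
  let maxq := pvPopBack (fun i => decide (pvGetI nums r > pvGetI nums i)) maxq ++ [r]
  let minq := pvPopBack (fun i => decide (pvGetI nums r < pvGetI nums i)) minq ++ [r]
  let maxq := if l > maxq.headD 0 then maxq.tail else maxq
  let minq := if l > minq.headD 0 then minq.tail else minq
  if r ≥ k - 1 then
    (ans + pvGetI nums (maxq.headD 0) + pvGetI nums (minq.headD 0), maxq, minq, l + 1)
  else
    (ans, maxq, minq, l)

def sumOfMaxAndMin (nums : List Int) (n : Int) (k : Int) : Int :=
  ((PySem.List.pyRange 0 n 1).foldl (pvStepA nums k) (0, [], [], 0)).1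

-- ===== PORT B =====
def sumOfMaxAndMin_alt (nums : List Int) (n : Int) (k : Int) : Int :=
  (PySem.List.pyRange (k - 1) n 1).foldl
    (fun total r =>
      let window := PySem.List.slice nums (some (r - k + 1)) (some (r + 1))
      total + (PySem.List.max? window (fun y => y)).getD 0
            + (PySem.List.min? window (fun y => y)).getD 0)
    0

-- ===== PRECONDITION & SPEC =====
-- Pre_ excludes n > len(nums), where Python A raises IndexError, and k ≤ 0 with k - 1 < n,
-- where A's left-pointer bookkeeping accidentally yields size-1 windows while B's natural
-- rescan raises ValueError on the empty slice (max([])).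
def Pre_sumOfMaxAndMin (nums : List Int) (n : Int) (k : Int) : Prop :=
  (1 ≤ k ∨ n ≤ k - 1) ∧ n ≤ (nums.length : Int)
instance (nums : List Int) (n : Int) (k : Int) : Decidable (Pre_sumOfMaxAndMin nums n k) := by
  unfold Pre_sumOfMaxAndMin; infer_instance

def pvWitness_sumOfMaxAndMin : List Int × Int × Int := ([1, 3, 2, 5], 4, 2)

def Spec_sumOfMaxAndMin (nums : List Int) (n : Int) (k : Int) (out : Int) : Prop := out = sumOfMaxAndMin_alt nums n k
instance (nums : List Int) (n : Int) (k : Int) (out : Int) : Decidable (Spec_sumOfMaxAndMin nums n k out) := by unfold Spec_sumOfMaxAndMin; infer_instance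

-- ===== CLAIM (what is proved, stated in full; the proofs are below) =====
def Claim_equal_sumOfMaxAndMin : Prop := ∀ (nums : List Int) (n : Int) (k : Int), Dom_sumOfMaxAndMin nums n k → Pre_sumOfMaxAndMin nums n k → Spec_sumOfMaxAndMin nums n k (sumOfMaxAndMin nums n k)

-- ===== LEMMAS AND PROOFS =====

def pvQual (g : ℕ → Int) (r i : ℕ) : Bool := decide (∀ j < r, i < j → g j ≤ g i)
def pvCand (g : ℕ → Int) (l r : ℕ) : List ℕ := (List.range' l (r - l)).filter (pvQual g r)
def pvPopBackN (p : ℕ → Bool) (q : List ℕ) : List ℕ := (q.reverse.dropWhile p).reverse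

lemma mem_pvCand {g : ℕ → Int} {l r i : ℕ} :
    i ∈ pvCand g l r ↔ (l ≤ i ∧ i < r) ∧ ∀ j < r, i < j → g j ≤ g i := by
  simp only [pvCand, pvQual, List.mem_filter, List.mem_range'_1, decide_eq_true_eq]
  constructor
  · rintro ⟨⟨h1, h2⟩, h3⟩; exact ⟨⟨h1, by omega⟩, h3⟩
  · rintro ⟨⟨h1, h2⟩, h3⟩; exact ⟨⟨h1, by omega⟩, h3⟩

lemma pvCand_sorted (g : ℕ → Int) (l r : ℕ) : (pvCand g l r).Pairwise (· < ·) := by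
  apply List.Pairwise.filter
  simpa using List.pairwise_lt_range' (s := l) (n := r - l) (step := 1)

lemma pvCand_self_mem {g : ℕ → Int} {l r : ℕ} (h : l ≤ r) : r ∈ pvCand g l (r + 1) := by
  rw [mem_pvCand]; exact ⟨⟨h, by omega⟩, fun j hj hj' => by omega⟩

lemma popBack_eq_filter (p : ℕ → Bool) (q : List ℕ)
    (hq : q.Pairwise (fun a b => p b = true → p a = true)) :
    pvPopBackN (fun i => !(p i)) q = q.filter p := by
  induction q with
  | nil => rfl
  | cons a t ih =>
    have hpair := (List.pairwise_cons.mp hq)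
    have ht : t.reverse.dropWhile (fun i => !(p i)) = (t.filter p).reverse := by
      have := ih hpair.2
      unfold pvPopBackN at this
      rw [← this, List.reverse_reverse]
    by_cases hpa : p a = true
    · unfold pvPopBackN
      rw [List.reverse_cons, List.dropWhile_append, ht]
      by_cases hte : t.filter p = []
      · simp [hte, List.filter_cons, hpa]
      · have : (¬ ((t.filter p).reverse.isEmpty = true)) := by simp [hte]
        simp only [this, if_neg, List.isEmpty_iff]
        rw [if_neg (by simpa using hte)]
        simp [List.filter_cons, hpa]
    · have hall : ∀ b ∈ t, ¬ p b = true := fun b hb hc => hpa (hpair.1 b hb hc)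
      have hft : t.filter p = [] := List.filter_eq_nil_iff.mpr hall
      unfold pvPopBackN
      rw [List.reverse_cons, List.dropWhile_append, ht, hft]
      simp [List.filter_cons, hpa, hft]

-- push step: pop strictly-smaller tail values, append r
lemma pvCand_push (g : ℕ → Int) (l r : ℕ) (hlr : l ≤ r) :
    pvPopBackN (fun i => decide (g i < g r)) (pvCand g l r) ++ [r] = pvCand g l (r + 1) := by
  have hpred : (fun i => decide (g i < g r)) = (fun i => !(decide (g r ≤ g i))) := by
    funext i
    rw [← decide_not]
    simp [not_le]
  have hpair : (pvCand g l r).Pairwise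
      (fun a b => decide (g r ≤ g b) = true → decide (g r ≤ g a) = true) := by
    refine List.Pairwise.imp_of_mem ?_ (pvCand_sorted g l r)
    intro a b ha hb hab
    simp only [decide_eq_true_eq]
    intro hrb
    have hb' := (mem_pvCand.mp hb)
    have ha' := (mem_pvCand.mp ha)
    exact le_trans hrb (ha'.2 b hb'.1.2 hab)
  have hpop : pvPopBackN (fun i => decide (g i < g r)) (pvCand g l r)
      = (pvCand g l r).filter (fun i => decide (g r ≤ g i)) := by
    rw [hpred]; exact popBack_eq_filter _ _ hpair
  rw [hpop]
  -- RHS: split the range at r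
  have hrange : List.range' l (r + 1 - l) = List.range' l (r - l) ++ [r] := by
    have h1 : r + 1 - l = (r - l) + 1 := by omega
    rw [h1, List.range'_1_concat]
    congr 2
    omega
  have hdomr : pvQual g (r + 1) r = true := by
    simp only [pvQual, decide_eq_true_eq]
    intro j hj hj'; omega
  unfold pvCand
  rw [hrange, List.filter_append]
  have hlast : List.filter (pvQual g (r+1)) [r] = [r] := by simp [hdomr]
  rw [hlast]
  congr 1
  rw [List.filter_filter]
  apply List.filter_congr
  intro i hi
  have hir : i < r := by
    have := List.mem_range'_1.mp hi
    omega
  rw [Bool.eq_iff_iff]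
  simp only [pvQual, Bool.and_eq_true, decide_eq_true_eq]
  constructor
  · rintro ⟨h2, h1⟩ j hj hij
    by_cases hjr : j = r
    · subst hjr; exact h2
    · exact h1 j (by omega) hij
  · intro h
    exact ⟨h r (by omega) hir, fun j hj hij => h j (by omega) hij⟩

-- popping the stale front
lemma pvCand_cons (g : ℕ → Int) (l r : ℕ) (hlr : l < r) :
    pvCand g l r = if pvQual g r l then l :: pvCand g (l + 1) r else pvCand g (l + 1) r := by
  unfold pvCand
  rw [show r - l = (r - (l+1)) + 1 from by omega, List.range'_succ, List.filter_cons]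

lemma pvCand_ne_nil {g : ℕ → Int} {l r : ℕ} (h : l ≤ r) : pvCand g l (r + 1) ≠ [] :=
  List.ne_nil_of_mem (pvCand_self_mem h)

lemma pvCand_headD_mem {g : ℕ → Int} {l r : ℕ} (h : l ≤ r) :
    (pvCand g l (r + 1)).headD 0 ∈ pvCand g l (r + 1) := by
  cases hq : pvCand g l (r + 1) with
  | nil => exact absurd hq (pvCand_ne_nil h)
  | cons a t => simp

lemma pvCand_headD_least {g : ℕ → Int} {l r i : ℕ} (hi : i ∈ pvCand g l r) :
    (pvCand g l r).headD 0 ≤ i := by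
  cases hq : pvCand g l r with
  | nil => simp [hq] at hi
  | cons a t =>
    rw [hq] at hi
    have hs := pvCand_sorted g l r
    rw [hq, List.pairwise_cons] at hs
    rw [List.headD_cons]
    rcases List.mem_cons.mp hi with h | h
    · omega
    · exact le_of_lt (hs.1 i h)

-- the stale-front pop: from window [r-K, r] to window [r+1-K, r]
lemma pvCand_popleft (g : ℕ → Int) (K r : ℕ) (hK : 1 ≤ K) :
    (if r + 1 - K > (pvCand g (r - K) (r + 1)).headD 0
       then (pvCand g (r - K) (r + 1)).tail
       else pvCand g (r - K) (r + 1)) = pvCand g (r + 1 - K) (r + 1) := by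
  by_cases hKr : K ≤ r
  · have hlt : r - K < r + 1 := by omega
    have hsucc : r + 1 - K = (r - K) + 1 := by omega
    rw [pvCand_cons g (r - K) (r + 1) hlt]
    by_cases hdom : pvQual g (r + 1) (r - K) = true
    · rw [if_pos hdom, hsucc]
      rw [if_pos (by simp)]
      rfl
    · rw [if_neg hdom]
      rw [if_neg ?_, hsucc]
      have hmem := pvCand_headD_mem (g := g) (l := (r - K) + 1) (r := r) (by omega)
      have := (mem_pvCand.mp hmem).1.1
      omega
  · have h0 : r + 1 - K ≤ r - K + 0 := by omega
    have he : r + 1 - K = r - K := by omega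
    rw [he]
    rw [if_neg ?_]
    have hmem := pvCand_headD_mem (g := g) (l := r - K) (r := r) (by omega)
    have := (mem_pvCand.mp hmem).1.1
    omega

-- the head of the candidate list carries the maximum of the window [l, r]
lemma pvCand_headD_max (g : ℕ → Int) (l r : ℕ) (hlr : l ≤ r) :
    (l ≤ (pvCand g l (r + 1)).headD 0 ∧ (pvCand g l (r + 1)).headD 0 ≤ r) ∧
    ∀ i, l ≤ i → i ≤ r → g i ≤ g ((pvCand g l (r + 1)).headD 0) := by
  set h := (pvCand g l (r + 1)).headD 0 with hh
  have hmem := pvCand_headD_mem (g := g) hlr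
  rw [← hh] at hmem
  have hm := mem_pvCand.mp hmem
  obtain ⟨⟨hml, hmr⟩, hmdom⟩ := hm
  refine ⟨⟨hml, by omega⟩, ?_⟩
  have key : ∀ d i, l ≤ i → i ≤ r → r - i ≤ d → g i ≤ g h := by
    intro d
    induction d with
    | zero =>
      intro i h1 h2 h3
      have : i = r := by omega
      subst this
      rcases Nat.eq_or_lt_of_le (show h ≤ i by omega) with he | hl
      · rw [he]
      · exact hmdom i (by omega) hl
    | succ d ih =>
      intro i h1 h2 h3
      by_cases hih : h ≤ i
      · rcases Nat.eq_or_lt_of_le hih with he | hl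
        · rw [he]
        · exact hmdom i (by omega) hl
      · push_neg at hih
        have hnot : i ∉ pvCand g l (r + 1) := by
          intro hc
          have := pvCand_headD_least hc
          omega
        have hnd : ¬ (∀ j < r + 1, i < j → g j ≤ g i) := by
          intro hc
          exact hnot (mem_pvCand.mpr ⟨⟨h1, by omega⟩, hc⟩)
        push_neg at hnd
        obtain ⟨j, hj1, hj2, hj3⟩ := hnd
        have : g i ≤ g j := le_of_lt hj3
        exact le_trans this (ih j (by omega) (by omega) (by omega))
  intro i h1 h2
  exact key (r - i) i h1 h2 (le_refl _)

def pvG (nums : List Int) : ℕ → Int := fun i => nums.getD i 0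
def pvG' (nums : List Int) : ℕ → Int := fun i => -nums.getD i 0
def pvK (k : Int) : ℕ := (max k 1).toNat

def pvSum (nums : List Int) (K r : ℕ) : Int :=
  ((List.range' (K - 1) (r - (K - 1))).map
    (fun r' => pvG nums ((pvCand (pvG nums) (r' + 1 - K) (r' + 1)).headD 0)
             + pvG nums ((pvCand (pvG' nums) (r' + 1 - K) (r' + 1)).headD 0))).sum

lemma pvK_pos (k : Int) : 1 ≤ pvK k := by
  have : (1 : Int) ≤ max k 1 := le_max_right _ _
  simp only [pvK]
  omega

lemma pvK_cast (k : Int) : ((pvK k : ℕ) : Int) = max k 1 := by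
  have : (1 : Int) ≤ max k 1 := le_max_right _ _
  simp only [pvK]
  omega

lemma pvGetI_natCast (nums : List Int) (i : ℕ) : pvGetI nums (i : Int) = nums.getD i 0 := by
  simp [pvGetI, List.getD_eq_getElem?_getD]

lemma pvPopBack_map (p : Int → Bool) (q : List ℕ) :
    pvPopBack p (q.map (Nat.cast : ℕ → Int))
      = (pvPopBackN (fun i => p (i : Int)) q).map (Nat.cast : ℕ → Int) := by
  unfold pvPopBack pvPopBackN
  rw [← List.map_reverse, List.dropWhile_map, ← List.map_reverse]
  rfl

lemma headD_map_natCast (q : List ℕ) :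
    ((q.map (Nat.cast : ℕ → Int)).headD 0) = ((q.headD 0 : ℕ) : Int) := by
  cases q <;> simp

lemma pvGuard_iff (k : Int) (r : ℕ) : ((r : Int) ≥ k - 1) ↔ pvK k - 1 ≤ r := by
  have hc := pvK_cast k
  by_cases h : k ≤ 1
  · rw [max_eq_right h] at hc
    have := pvK_pos k
    constructor <;> intro <;> omega
  · rw [max_eq_left (by omega)] at hc
    constructor <;> intro <;> omega

lemma pvSum_succ_guard (nums : List Int) (K r : ℕ) (h : K - 1 ≤ r) :
    pvSum nums K (r + 1)
      = pvSum nums K r + (pvG nums ((pvCand (pvG nums) (r + 1 - K) (r + 1)).headD 0)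
                        + pvG nums ((pvCand (pvG' nums) (r + 1 - K) (r + 1)).headD 0)) := by
  unfold pvSum
  rw [show r + 1 - (K - 1) = (r - (K - 1)) + 1 from by omega, List.range'_1_concat,
      List.map_append, List.sum_append, show K - 1 + (r - (K - 1)) = r from by omega]
  simp

lemma pvSum_succ_noguard (nums : List Int) (K r : ℕ) (h : r < K - 1) :
    pvSum nums K (r + 1) = pvSum nums K r := by
  unfold pvSum
  rw [show r + 1 - (K - 1) = 0 from by omega, show r - (K - 1) = 0 from by omega]

lemma pvPopBack_map' (p : Int → Bool) (pn : ℕ → Bool) (hp : ∀ i : ℕ, p (i : Int) = pn i)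
    (q : List ℕ) :
    pvPopBack p (q.map (Nat.cast : ℕ → Int)) = (pvPopBackN pn q).map (Nat.cast : ℕ → Int) := by
  rw [pvPopBack_map]
  have h : (fun i : ℕ => p (i : Int)) = pn := funext hp
  rw [h]

lemma map_cast_append_singleton (q : List ℕ) (r : ℕ) :
    q.map (Nat.cast : ℕ → Int) ++ [(r : Int)] = (q ++ [r]).map (Nat.cast : ℕ → Int) := by simp

lemma loopA_inv (nums : List Int) (k : Int) (r : ℕ) :
    ((List.range r).map (Nat.cast : ℕ → Int)).foldl (pvStepA nums k) (0, [], [], 0)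
      = (pvSum nums (pvK k) r,
         (pvCand (pvG nums) (r - pvK k) r).map (Nat.cast : ℕ → Int),
         (pvCand (pvG' nums) (r - pvK k) r).map (Nat.cast : ℕ → Int),
         ((r - (pvK k - 1) : ℕ) : Int)) := by
  have hK := pvK_pos k
  induction r with
  | zero => simp [pvSum, pvCand]
  | succ r ih =>
    rw [List.range_succ, List.map_append, List.foldl_append, ih]
    simp only [List.map_cons, List.map_nil, List.foldl_cons, List.foldl_nil]
    simp only [pvStepA]
    rw [pvPopBack_map' _ (fun i => decide (pvG nums i < pvG nums r))
          (by intro i; simp [gt_iff_lt, pvGetI_natCast, pvG]),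
        pvPopBack_map' _ (fun i => decide (pvG' nums i < pvG' nums r))
          (by intro i; simp only [pvGetI_natCast, pvG']; apply decide_eq_decide.mpr; omega)]
    rw [map_cast_append_singleton, map_cast_append_singleton]
    rw [pvCand_push (pvG nums) _ r (Nat.sub_le r (pvK k)),
        pvCand_push (pvG' nums) _ r (Nat.sub_le r (pvK k))]
    rw [headD_map_natCast, headD_map_natCast]
    simp only [gt_iff_lt, Nat.cast_lt, ← List.map_tail, ← apply_ite (List.map (Nat.cast : ℕ → Int))]
    rw [show r - (pvK k - 1) = r + 1 - pvK k from by omega]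
    rw [pvCand_popleft (pvG nums) (pvK k) r hK, pvCand_popleft (pvG' nums) (pvK k) r hK]
    by_cases hgd : (r : Int) ≥ k - 1
    · have hgn : pvK k - 1 ≤ r := (pvGuard_iff k r).mp hgd
      rw [if_pos hgd]
      rw [headD_map_natCast, headD_map_natCast, pvGetI_natCast, pvGetI_natCast]
      rw [pvSum_succ_guard nums (pvK k) r hgn]
      have h4 : ((r + 1 - pvK k : ℕ) : Int) + 1 = ((r + 1 - (pvK k - 1) : ℕ) : Int) := by omega
      rw [h4, add_assoc]
      rfl
    · have hgn : r < pvK k - 1 := by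
        have := (pvGuard_iff k r).not.mp hgd
        omega
      rw [if_neg hgd]
      rw [pvSum_succ_noguard nums (pvK k) r hgn]
      have h4 : ((r + 1 - pvK k : ℕ) : Int) = ((r + 1 - (pvK k - 1) : ℕ) : Int) := by omega
      rw [h4]

lemma a_eq (nums : List Int) (n k : Int) (hn : 0 ≤ n) :
    sumOfMaxAndMin nums n k = pvSum nums (pvK k) n.toNat := by
  unfold sumOfMaxAndMin
  rw [show n = ((n.toNat : ℕ) : Int) from (Int.toNat_of_nonneg hn).symm]
  rw [PySem.List.pyRange_zero_natCast]
  rw [show (fun k : ℕ => (k : Int)) = (Nat.cast : ℕ → Int) from rfl]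
  rw [loopA_inv]
  simp only [Int.toNat_natCast]

lemma window_eq_map (nums : List Int) (a r : ℕ) (hr : r < nums.length) :
    (List.range' a (r + 1 - a)).map (pvG nums) = List.take (r + 1 - a) (List.drop a nums) := by
  apply List.ext_getElem
  · simp only [List.length_map, List.length_range', List.length_take, List.length_drop]
    omega
  · intro i h1 h2
    simp only [List.length_map, List.length_range'] at h1
    simp only [List.getElem_map, List.getElem_range', List.getElem_take, List.getElem_drop, one_mul]
    have hlt : a + i < nums.length := by omega
    simp only [pvG]
    rw [List.getD_eq_getElem _ _ hlt]

lemma window_extrema (nums : List Int) (K r : ℕ) (hK : 1 ≤ K) (hr2 : r < nums.length) :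
    (PySem.List.max? (PySem.List.slice nums (some ((r + 1 - K : ℕ) : Int)) (some ((r + 1 : ℕ) : Int))) (fun y => y)).getD 0
      = pvG nums ((pvCand (pvG nums) (r + 1 - K) (r + 1)).headD 0)
    ∧ (PySem.List.min? (PySem.List.slice nums (some ((r + 1 - K : ℕ) : Int)) (some ((r + 1 : ℕ) : Int))) (fun y => y)).getD 0
      = pvG nums ((pvCand (pvG' nums) (r + 1 - K) (r + 1)).headD 0) := by
  have ha : r + 1 - K ≤ r := by omega
  rw [PySem.List.slice_natCast]
  rw [← window_eq_map nums (r + 1 - K) r hr2]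
  set a := r + 1 - K with hadef
  set win := (List.range' a (r + 1 - a)).map (pvG nums) with hwin
  have hnil : win ≠ [] := by
    rw [hwin]
    simp only [ne_eq, List.map_eq_nil_iff, List.range'_eq_nil_iff]
    omega
  have hmemwin : ∀ x, x ∈ win ↔ ∃ i, (a ≤ i ∧ i ≤ r) ∧ x = pvG nums i := by
    intro x
    rw [hwin]
    simp only [List.mem_map, List.mem_range'_1]
    constructor
    · rintro ⟨i, ⟨hi1, hi2⟩, hix⟩
      exact ⟨i, ⟨hi1, by omega⟩, hix.symm⟩
    · rintro ⟨i, ⟨hi1, hi2⟩, hix⟩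
      exact ⟨i, ⟨hi1, by omega⟩, hix.symm⟩
  constructor
  · obtain ⟨v, hv⟩ : ∃ v, PySem.List.max? win (fun y => y) = some v := by
      cases h : PySem.List.max? win (fun y => y) with
      | none => exact absurd ((PySem.List.max?_eq_none_iff _ _).mp h) hnil
      | some v => exact ⟨v, rfl⟩
    rw [hv, Option.getD_some]
    obtain ⟨⟨hh1, hh2⟩, hub⟩ := pvCand_headD_max (pvG nums) a r ha
    apply le_antisymm
    · obtain ⟨i, ⟨hi1, hi2⟩, hiv⟩ := (hmemwin v).mp (PySem.List.max?_mem hv)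
      rw [hiv]
      exact hub i hi1 hi2
    · exact PySem.List.max?_isMax hv _ ((hmemwin _).mpr ⟨_, ⟨hh1, hh2⟩, rfl⟩)
  · obtain ⟨v, hv⟩ : ∃ v, PySem.List.min? win (fun y => y) = some v := by
      cases h : PySem.List.min? win (fun y => y) with
      | none => exact absurd ((PySem.List.min?_eq_none_iff _ _).mp h) hnil
      | some v => exact ⟨v, rfl⟩
    rw [hv, Option.getD_some]
    obtain ⟨⟨hh1, hh2⟩, hub⟩ := pvCand_headD_max (pvG' nums) a r ha
    set h' := (pvCand (pvG' nums) a (r + 1)).headD 0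
    have hlb : ∀ i, a ≤ i → i ≤ r → pvG nums h' ≤ pvG nums i := by
      intro i h1 h2
      have := hub i h1 h2
      simp only [pvG', pvG] at this ⊢
      omega
    apply le_antisymm
    · exact PySem.List.min?_isMin hv _ ((hmemwin _).mpr ⟨_, ⟨hh1, hh2⟩, rfl⟩)
    · obtain ⟨i, ⟨hi1, hi2⟩, hiv⟩ := (hmemwin v).mp (PySem.List.min?_mem hv)
      rw [hiv]
      exact hlb i hi1 hi2

lemma foldl_add2 (t1 t2 : ℕ → Int) (l : List ℕ) (c : Int) :
    l.foldl (fun acc x => acc + t1 x + t2 x) c = c + (l.map (fun x => t1 x + t2 x)).sum := by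
  induction l generalizing c with
  | nil => simp
  | cons a l ih =>
    simp only [List.foldl_cons, List.map_cons, List.sum_cons, ih]
    ring

lemma alt_eq (nums : List Int) (n k : Int) (hk : 1 ≤ k) (hn : 0 ≤ n)
    (hlen : n ≤ (nums.length : Int)) :
    sumOfMaxAndMin_alt nums n k = pvSum nums (pvK k) n.toNat := by
  simp only [sumOfMaxAndMin_alt]
  have hK := pvK_pos k
  have hKc : ((pvK k : ℕ) : Int) = k := by rw [pvK_cast, max_eq_left hk]
  have h1 : k - 1 = ((pvK k - 1 : ℕ) : Int) := by omega
  rw [h1]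
  rw [show n = ((n.toNat : ℕ) : Int) from (Int.toNat_of_nonneg hn).symm]
  have hrange : PySem.List.pyRange ((pvK k - 1 : ℕ) : Int) ((n.toNat : ℕ) : Int) 1
      = (List.range' (pvK k - 1) (n.toNat - (pvK k - 1))).map (Nat.cast : ℕ → Int) := by
    rw [PySem.List.pyRange_one, List.range'_eq_map_range, List.map_map]
    rw [show (((n.toNat : ℕ) : Int) - ((pvK k - 1 : ℕ) : Int)).toNat = n.toNat - (pvK k - 1) from by omega]
    apply List.map_congr_left
    intro i hi
    simp only [Function.comp_apply]
    push_cast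
    ring
  rw [hrange, List.foldl_map]
  rw [foldl_add2]
  rw [zero_add]
  unfold pvSum
  apply congrArg
  apply List.map_congr_left
  intro x hx
  have hxb := List.mem_range'_1.mp hx
  have hx1 : pvK k - 1 ≤ x := hxb.1
  have hx2 : x < n.toNat := by omega
  have hxlen : x < nums.length := by omega
  have hb1 : ((x : ℕ) : Int) - k + 1 = ((x + 1 - pvK k : ℕ) : Int) := by omega
  have hb2 : ((x : ℕ) : Int) + 1 = ((x + 1 : ℕ) : Int) := by omega
  rw [hb1, hb2]
  obtain ⟨hmax, hmin⟩ := window_extrema nums (pvK k) x hK hxlen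
  rw [hmax, hmin]

lemma sumOfMaxAndMin_agree (nums : List Int) (n k : Int) (hk : 1 ≤ k ∨ n ≤ k - 1)
    (hlen : n ≤ (nums.length : Int)) :
    sumOfMaxAndMin nums n k = sumOfMaxAndMin_alt nums n k := by
  by_cases hk1 : 1 ≤ k
  · by_cases hn : 0 ≤ n
    · rw [a_eq nums n k hn, alt_eq nums n k hk1 hn hlen]
    · unfold sumOfMaxAndMin
      simp only [sumOfMaxAndMin_alt]
      rw [PySem.List.pyRange_one_eq_nil (by omega), PySem.List.pyRange_one_eq_nil (by omega)]
      simp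
  · -- k ≤ 0 and n ≤ k - 1 < 0: both loops are empty
    have hnk : n ≤ k - 1 := hk.resolve_left hk1
    unfold sumOfMaxAndMin
    simp only [sumOfMaxAndMin_alt]
    rw [PySem.List.pyRange_one_eq_nil (by omega), PySem.List.pyRange_one_eq_nil (by omega)]
    simp

-- ===== VERDICT (by name: the statement is the Claim_ definition above) =====
theorem sumOfMaxAndMin_spec : Claim_equal_sumOfMaxAndMin := by
  intro nums n k _hdom hpre
  unfold Spec_sumOfMaxAndMin
  exact sumOfMaxAndMin_agree nums n k hpre.1 hpre.2
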